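-- pv_equiv track=rewrite | github.com/notyamasu/martial-arts-cv | martial_arts-main/martial_arts_python/martial_arts_engine.py | get_aligned_segments
-- ===== SOURCE A (Python) =====
-- def get_aligned_segments(path, window_size=30):
--     segments = []
--     for i in range(0, len(path) - window_size, window_size):
--         window = path[i:i + window_size]
--         expert_idx = [e for e, _ in window]
--         user_idx = [u for _, u in window]
--         segments.append((expert_idx, user_idx))
--     return segments
-- ===== SOURCE B (Python) =====
-- def get_aligned_segments(path, window_size=30):
--     # Peel full windows off the front of the remaining path while strictly more
--     # than window_size points remain (this drops the trailing window, like A).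
--     if window_size <= 0:
--         return []
--     segments = []
--     rest = path
--     while len(rest) > window_size:
--         window, rest = rest[:window_size], rest[window_size:]
--         expert_idx = []
--         user_idx = []
--         for e, u in window:
--             expert_idx.append(e)
--             user_idx.append(u)
--         segments.append((expert_idx, user_idx))
--     return segments
-- ===== Notes on version B (the rewrite author's own statement) =====
-- stated objective: alternative
-- what changed: B replaces A's index loop over range(0, len-w, w) with index slicing by a destructuring peel loop: it repeatedly splits the remaining path into a head window and a tail while more than window_size points remain, and unzips each window with a single accumulator pass instead of two comprehensions.
import Mathlib
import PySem

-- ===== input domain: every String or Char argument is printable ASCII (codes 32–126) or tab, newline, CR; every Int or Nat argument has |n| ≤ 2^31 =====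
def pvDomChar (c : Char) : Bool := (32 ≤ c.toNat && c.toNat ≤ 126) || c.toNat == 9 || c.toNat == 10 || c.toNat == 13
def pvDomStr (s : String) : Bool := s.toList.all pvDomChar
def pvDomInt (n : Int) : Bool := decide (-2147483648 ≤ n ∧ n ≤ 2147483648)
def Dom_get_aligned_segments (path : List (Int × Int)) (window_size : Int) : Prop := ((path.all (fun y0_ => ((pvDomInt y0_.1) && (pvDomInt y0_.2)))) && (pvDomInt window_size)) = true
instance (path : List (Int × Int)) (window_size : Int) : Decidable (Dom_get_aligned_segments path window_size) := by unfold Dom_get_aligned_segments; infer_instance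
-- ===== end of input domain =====

-- B peels full windows off the front of the remaining path with a destructuring while-loop (single accumulator unzip per window) instead of A's range-index slicing; alternative decomposition, same cost. A raises ValueError on window_size = 0 (excluded by Pre_); B returns [] there.


-- ===== PORT A =====
def get_aligned_segments (path : List (Int × Int)) (window_size : Int) : List (List Int × List Int) :=
  (PySem.List.pyRange 0 ((path.length : Int) - window_size) window_size).foldl
    (fun segments i =>
      let window := PySem.List.slice path (some i) (some (i + window_size))
      let expert_idx := window.map (fun p => p.1)
      let user_idx := window.map (fun p => p.2)
      segments ++ [(expert_idx, user_idx)]) []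

-- ===== PORT B =====
-- for e, u in window: expert_idx.append(e); user_idx.append(u)
def altSplit (window : List (Int × Int)) : List Int × List Int :=
  window.foldl (fun acc p => (acc.1 ++ [p.1], acc.2 ++ [p.2])) ([], [])

-- while len(rest) > window_size: window, rest = rest[:window_size], rest[window_size:]; …
-- wn = window_size.toNat (the caller has checked 0 < window_size, so rest[:wn] = take wn,
-- rest[wn:] = drop wn exactly — PySem.List.slice_to/slice_from); the '0 < wn' conjunct only
-- makes the recursion total and is guaranteed by the caller.
def altLoop (wn : Nat) (segments : List (List Int × List Int)) (rest : List (Int × Int)) : List (List Int × List Int) :=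
  if h : wn < rest.length ∧ 0 < wn then
    altLoop wn (segments ++ [altSplit (rest.take wn)]) (rest.drop wn)
  else segments
termination_by rest.length
decreasing_by simp only [List.length_drop]; omega

def get_aligned_segments_alt (path : List (Int × Int)) (window_size : Int) : List (List Int × List Int) :=
  if window_size ≤ 0 then [] else altLoop window_size.toNat [] path

-- ===== PRECONDITION & SPEC =====
-- range(0, len(path) - window_size, window_size) raises ValueError when the step is 0; Pre_ excludes exactly that.
def Pre_get_aligned_segments (path : List (Int × Int)) (window_size : Int) : Prop := window_size ≠ 0
instance (path : List (Int × Int)) (window_size : Int) : Decidable (Pre_get_aligned_segments path window_size) := by unfold Pre_get_aligned_segments; infer_instance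
def pvWitness_get_aligned_segments : (List (Int × Int)) × Int := ([(1, 2), (3, 4), (5, 6), (7, 8)], 2)

def Spec_get_aligned_segments (path : List (Int × Int)) (window_size : Int) (out : List (List Int × List Int)) : Prop := out = get_aligned_segments_alt path window_size
instance (path : List (Int × Int)) (window_size : Int) (out : List (List Int × List Int)) : Decidable (Spec_get_aligned_segments path window_size out) := by unfold Spec_get_aligned_segments; infer_instance

-- ===== CLAIM (what is proved, stated in full; the proofs are below) =====
def Claim_equal_get_aligned_segments : Prop := ∀ (path : List (Int × Int)) (window_size : Int), Dom_get_aligned_segments path window_size → Pre_get_aligned_segments path window_size → Spec_get_aligned_segments path window_size (get_aligned_segments path window_size)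


-- ===== LEMMAS AND PROOFS =====
theorem foldl_append_singleton {α β : Type} (l : List α) (g : α → β) (acc : List β) :
    l.foldl (fun acc i => acc ++ [g i]) acc = acc ++ l.map g := by
  induction l generalizing acc with
  | nil => simp
  | cons x xs ih => simp [List.foldl, ih]

theorem altSplit_go (l : List (Int × Int)) (acc : List Int × List Int) :
    l.foldl (fun acc p => (acc.1 ++ [p.1], acc.2 ++ [p.2])) acc
      = (acc.1 ++ l.map (fun p => p.1), acc.2 ++ l.map (fun p => p.2)) := by
  induction l generalizing acc with
  | nil => simp
  | cons x xs ih => simp [List.foldl, ih]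

theorem altSplit_eq (l : List (Int × Int)) :
    altSplit l = (l.map (fun p => p.1), l.map (fun p => p.2)) := by
  simp [altSplit, altSplit_go]

theorem countN_zero (L : Nat) (w : Int) (hw : 0 < w) (h : (L : Int) ≤ w) :
    (((L : Int) - 1) / w).toNat = 0 := by
  rcases Nat.eq_zero_or_pos L with h0 | h1
  · subst h0
    simp only [Nat.cast_zero]
    have hd := Int.mul_ediv_add_emod (-1) w
    have hr := Int.emod_nonneg (-1) (ne_of_gt hw)
    by_contra hq
    have hq2 : 0 < ((0:Int) - 1) / w := by omega
    have : 0 ≤ w * (((0:Int) - 1) / w) := mul_nonneg (le_of_lt hw) (le_of_lt hq2)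
    have e : ((0:Int) - 1) = -1 := by norm_num
    rw [e] at hq2 this
    omega
  · have := Int.ediv_eq_zero_of_lt (a := (L : Int) - 1) (b := w) (by omega) (by omega)
    omega

theorem count_eq (L : Nat) (w : Int) (hw : 0 < w) :
    (if (0:Int) < (L:Int) - w then (((L:Int) - w + w - 1) / w).toNat else 0)
      = (((L:Int) - 1) / w).toNat := by
  split_ifs with h
  · congr 1; ring_nf
  · exact (countN_zero L w hw (by omega)).symm

theorem A_char (path : List (Int × Int)) (w : Int) (hw : 0 < w) :
    get_aligned_segments path w =
      (List.range ((((path.length : Int) - 1) / w).toNat)).map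
        (fun (k : Nat) => (((path.drop (w * (k : Int)).toNat).take w.toNat).map (fun p => p.1),
                   ((path.drop (w * (k : Int)).toNat).take w.toNat).map (fun p => p.2))) := by
  unfold get_aligned_segments
  rw [PySem.List.pyRange_of_pos _ _ hw, foldl_append_singleton]
  simp only [List.nil_append, List.map_map, sub_zero]
  rw [count_eq path.length w hw]
  apply List.map_congr_left
  intro k _
  have h1 : (0:Int) ≤ w * k := by positivity
  simp only [Function.comp_def, zero_add]
  rw [PySem.List.slice_toNat path h1 (by omega)]
  have h2 : (w * (k:Int) + w).toNat - (w * (k:Int)).toNat = w.toNat := by omega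
  rw [h2]

theorem A_nil_of_le (path : List (Int × Int)) (w : Int) (hw : 0 < w)
    (h : (path.length : Int) ≤ w) : get_aligned_segments path w = [] := by
  rw [A_char path w hw]
  rw [countN_zero path.length w hw h]
  rfl

theorem A_cons (path : List (Int × Int)) (w : Int) (hw : 0 < w)
    (h : w < (path.length : Int)) :
    get_aligned_segments path w =
      ((path.take w.toNat).map (fun p => p.1), (path.take w.toNat).map (fun p => p.2))
        :: get_aligned_segments (path.drop w.toNat) w := by
  rw [A_char path w hw, A_char (path.drop w.toNat) w hw]
  have hL' : (((path.drop w.toNat).length : Int)) = (path.length : Int) - w := by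
    simp only [List.length_drop]
    omega
  rw [hL']
  have hN1 : 1 ≤ ((path.length : Int) - 1) / w := by
    rw [Int.le_ediv_iff_mul_le hw]; omega
  have hsub : ((path.length : Int) - w - 1) / w = ((path.length : Int) - 1) / w - 1 := by
    have e : (path.length : Int) - w - 1 = ((path.length : Int) - 1) + (-1) * w := by ring
    rw [e, Int.add_mul_ediv_right _ _ (ne_of_gt hw)]
    omega
  have hNs : (((path.length : Int) - 1) / w).toNat
      = ((((path.length : Int) - w) - 1) / w).toNat + 1 := by omega
  rw [hNs, List.range_succ_eq_map]
  simp only [List.map_cons, List.map_map]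
  congr 1
  · simp
  · apply List.map_congr_left
    intro k _
    have h1 : (0:Int) ≤ w * (k : Int) := by positivity
    have e : w * ((k : Int) + 1) = w * (k : Int) + w := by ring
    have h2 : (w * ((Nat.succ k : Nat) : Int)).toNat = (w * (k : Int)).toNat + w.toNat := by
      have e1 : ((Nat.succ k : Nat) : Int) = (k : Int) + 1 := by push_cast; ring
      rw [e1, e]
      omega
    have h3 : (path.drop w.toNat).drop (w * (k : Int)).toNat
        = path.drop (w * ((Nat.succ k : Nat) : Int)).toNat := by
      rw [List.drop_drop, h2]
      congr 1
      omega
    simp only [Function.comp_def, ← h3]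

theorem altLoop_eq (w : Int) (hw : 0 < w) :
    ∀ (n : Nat) (rest : List (Int × Int)), rest.length ≤ n →
      ∀ (segs : List (List Int × List Int)),
        altLoop w.toNat segs rest = segs ++ get_aligned_segments rest w := by
  intro n
  induction n with
  | zero =>
    intro rest hlen segs
    rw [altLoop, dif_neg (by omega)]
    rw [A_nil_of_le rest w hw (by omega), List.append_nil]
  | succ n ih =>
    intro rest hlen segs
    by_cases hc : w.toNat < rest.length ∧ 0 < w.toNat
    · rw [altLoop, dif_pos hc]
      rw [ih (rest.drop w.toNat) (by simp only [List.length_drop]; omega)]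
      rw [A_cons rest w hw (by omega), altSplit_eq]
      simp
    · rw [altLoop, dif_neg hc]
      have : (rest.length : Int) ≤ w := by omega
      rw [A_nil_of_le rest w hw this, List.append_nil]

-- ===== VERDICT (by name: the statement is the Claim_ definition above) =====
theorem get_aligned_segments_spec : Claim_equal_get_aligned_segments := by
  intro path w _ hpre
  unfold Spec_get_aligned_segments get_aligned_segments_alt
  by_cases hw : w ≤ 0
  · rw [if_pos hw]
    -- w < 0 (w ≠ 0 by Pre_): the Python range is empty, A returns []
    unfold get_aligned_segments
    have hr : PySem.List.pyRange 0 ((path.length : Int) - w) w = [] := by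
      have hw' : w < 0 := lt_of_le_of_ne hw hpre
      simp only [PySem.List.pyRange]
      split_ifs with h1 h2 h3 <;> first | rfl | omega
    rw [hr]
    rfl
  · rw [if_neg hw]
    rw [altLoop_eq w (by omega) path.length path le_rfl []]
    simp
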